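-- pv_equiv track=rewrite | github.com/chico127/Enumeration-of-conference-matrices | zach_perm.py | denum_matrix
-- ===== SOURCE A (Python) =====
-- import copy
--
-- donu = [0, 1, 2, 3, 4, 5]
--
-- def symetrizuj(M, c, k, p, d_row, pivot):
--     d = c
--     for j in range(1, d_row + 1, 1):
--         if j > pivot:
--             d = 2
--         for i in range(0, c*k + 2, 1):
--             if j < i:
--                 M[i][j] = divmod(M[j][i] + p, d)[1]
--     return M
--
-- def denum_matrix(c, k, p, num, d_row, pivot):
--     m = [0 for i in range(0, c*k + 2, 1)]
--     M = [copy.deepcopy(m) for i in range(0, c*k + 2, 1)]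
--     if c == 6:
--         for j in range(d_row, 0, -1):
--             for i in range(c * k + 1, 1, -1):
--                 if j < i:
--                     num, b = divmod(num, c)
--                     M[j][i] = donu[b]
--         return symetrizuj(M, c, k, p, d_row, pivot)
--     else:
--         for j in range(d_row, 0, -1):
--             for i in range(c * k + 1, 1, -1):
--                 if j < i:
--                     num, M[j][i] = divmod(num, c)
--         return symetrizuj(M, c, k, p, d_row, pivot)
-- ===== SOURCE B (Python) =====
-- def denum_matrix(c, k, p, num, d_row, pivot):
--     # Single fused pass: write each base-c digit and its symmetrized mirror
--     # entry in the same step, instead of a fill pass followed by a second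
--     # symmetrizing sweep over the whole triangle.
--     n = c * k + 2
--     M = [[0] * n for _ in range(n)]
--     for j in range(d_row, 0, -1):
--         for i in range(c * k + 1, 1, -1):
--             if j < i:
--                 num, digit = divmod(num, c)
--                 M[j][i] = digit
--                 M[i][j] = (digit + p) % (c if j <= pivot else 2)
--     return M
-- ===== Notes on version B (the rewrite author's own statement) =====
-- stated objective: simpler
-- what changed: The fill pass and the separate symmetrizing sweep (plus the c==6 donu-lookup branch, which is the identity) are fused into one nested loop that writes each base-c digit and its mirrored (digit+p) mod (c or 2) entry in the same step, halving the traversals and dropping the second function.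
import Mathlib
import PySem

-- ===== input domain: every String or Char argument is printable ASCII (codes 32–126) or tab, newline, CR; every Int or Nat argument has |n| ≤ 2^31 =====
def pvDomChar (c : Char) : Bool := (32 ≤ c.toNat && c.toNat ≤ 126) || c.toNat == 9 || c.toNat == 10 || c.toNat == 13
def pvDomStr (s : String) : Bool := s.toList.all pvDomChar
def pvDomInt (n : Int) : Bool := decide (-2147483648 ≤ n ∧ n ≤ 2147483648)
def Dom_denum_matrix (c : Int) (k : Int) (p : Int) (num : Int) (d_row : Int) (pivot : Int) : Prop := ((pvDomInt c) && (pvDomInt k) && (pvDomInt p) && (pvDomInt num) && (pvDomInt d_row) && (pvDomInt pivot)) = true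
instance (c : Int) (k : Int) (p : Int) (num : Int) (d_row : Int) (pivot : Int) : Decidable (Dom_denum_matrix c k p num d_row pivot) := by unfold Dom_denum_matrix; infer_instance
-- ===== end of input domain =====

-- B fuses A's two triangle passes (fill, then symmetrize) into one loop writing each digit and its mirror together; objective: simpler.

-- ===== PORT A =====
-- M[j][i] = v / M[j][i] for the list-of-lists matrix; exact for the indices the
-- programs reach (0 ≤ j < len(M), 0 ≤ i < len(M[j]) always holds there, see proofs).
def pySet2 (M : List (List Int)) (j i : Int) (v : Int) : List (List Int) :=
  M.set j.toNat ((M.getD j.toNat []).set i.toNat v)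

def pyGet2 (M : List (List Int)) (j i : Int) : Int :=
  (M.getD j.toNat []).getD i.toNat 0

def donuL : List Int := [0, 1, 2, 3, 4, 5]

def symetrizujL (M : List (List Int)) (c : Int) (k : Int) (p : Int) (d_row : Int) (pivot : Int) : List (List Int) :=
  ((PySem.List.pyRange 1 (d_row + 1) 1).foldl
    (fun (st : Int × List (List Int)) j =>
      let d := if pivot < j then 2 else st.1
      (d, (PySem.List.pyRange 0 (c * k + 2) 1).foldl
            (fun Mc i =>
              if j < i then pySet2 Mc i j (PySem.Int.mod (pyGet2 Mc j i + p) d) else Mc)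
            st.2))
    (c, M)).2

-- divmod(num, c) is ported with the total floordiv/mod: the loop body is reached
-- only when the inner range is nonempty, which forces c ≠ 0 (exact there).
-- donu[b] is ported as (pyGet? donuL b).getD 0: reached only with 0 ≤ b < 6 (exact there).
def denum_matrix (c : Int) (k : Int) (p : Int) (num : Int) (d_row : Int) (pivot : Int) : List (List Int) :=
  let m : List Int := (PySem.List.pyRange 0 (c * k + 2) 1).map (fun _ => 0)
  let M : List (List Int) := (PySem.List.pyRange 0 (c * k + 2) 1).map (fun _ => m)
  if c = 6 then
    let s := (PySem.List.pyRange d_row 0 (-1)).foldl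
      (fun (st : Int × List (List Int)) j =>
        (PySem.List.pyRange (c * k + 1) 1 (-1)).foldl
          (fun st i =>
            if j < i then
              (PySem.Int.floordiv st.1 c,
               pySet2 st.2 j i ((PySem.List.pyGet? donuL (PySem.Int.mod st.1 c)).getD 0))
            else st)
          st)
      (num, M)
    symetrizujL s.2 c k p d_row pivot
  else
    let s := (PySem.List.pyRange d_row 0 (-1)).foldl
      (fun (st : Int × List (List Int)) j =>
        (PySem.List.pyRange (c * k + 1) 1 (-1)).foldl
          (fun st i =>
            if j < i then
              (PySem.Int.floordiv st.1 c, pySet2 st.2 j i (PySem.Int.mod st.1 c))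
            else st)
          st)
      (num, M)
    symetrizujL s.2 c k p d_row pivot

-- ===== PORT B =====
def denum_matrix_alt (c : Int) (k : Int) (p : Int) (num : Int) (d_row : Int) (pivot : Int) : List (List Int) :=
  let n := c * k + 2
  let M : List (List Int) := (List.range n.toNat).map (fun _ => List.replicate n.toNat (0 : Int))
  ((PySem.List.pyRange d_row 0 (-1)).foldl
    (fun (st : Int × List (List Int)) j =>
      (PySem.List.pyRange (c * k + 1) 1 (-1)).foldl
        (fun st i =>
          if j < i then
            let digit := PySem.Int.mod st.1 c
            (PySem.Int.floordiv st.1 c,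
             pySet2 (pySet2 st.2 j i digit) i j
               (PySem.Int.mod (digit + p) (if j ≤ pivot then c else 2)))
          else st)
        st)
    (num, M)).2

-- ===== PRECONDITION & SPEC =====
def Spec_denum_matrix (c : Int) (k : Int) (p : Int) (num : Int) (d_row : Int) (pivot : Int) (out : List (List Int)) : Prop := out = denum_matrix_alt c k p num d_row pivot
instance (c : Int) (k : Int) (p : Int) (num : Int) (d_row : Int) (pivot : Int) (out : List (List Int)) : Decidable (Spec_denum_matrix c k p num d_row pivot out) := by unfold Spec_denum_matrix; infer_instance

-- ===== CLAIM (what is proved, stated in full; the proofs are below) =====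
def Claim_equal_denum_matrix : Prop := ∀ (c : Int) (k : Int) (p : Int) (num : Int) (d_row : Int) (pivot : Int), Dom_denum_matrix c k p num d_row pivot → Spec_denum_matrix c k p num d_row pivot (denum_matrix c k p num d_row pivot)

-- ===== LEMMAS AND PROOFS =====

-- The abstract write list: the (j, i) pairs in A's (and B's) fill order, each
-- paired with the base-c digit consumed at that position.
def dPairs (c k d_row : Int) : List (Int × Int) :=
  (PySem.List.pyRange d_row 0 (-1)).flatMap (fun j =>
    ((PySem.List.pyRange (c * k + 1) 1 (-1)).filter (fun i => decide (j < i))).map (fun i => (j, i)))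

def ascBlock (c k : Int) (j : Int) : List (Int × Int) :=
  ((PySem.List.pyRange 0 (c * k + 2) 1).filter (fun i => decide (j < i))).map (fun i => (j, i))

def aPairs (c k d_row : Int) : List (Int × Int) :=
  (PySem.List.pyRange 1 (d_row + 1) 1).flatMap (ascBlock c k)

def thread (c : Int) : Int → List (Int × Int) → List (Int × Int × Int)
  | _, [] => []
  | n, ji :: rest => (ji.1, ji.2, PySem.Int.mod n c) :: thread c (PySem.Int.floordiv n c) rest

def fillW (M : List (List Int)) (ws : List (Int × Int × Int)) : List (List Int) :=
  ws.foldl (fun M w => pySet2 M w.1 w.2.1 w.2.2) M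

def mirW (p c pivot : Int) (M : List (List Int)) (ws : List (Int × Int × Int)) : List (List Int) :=
  ws.foldl (fun M w => pySet2 M w.2.1 w.1 (PySem.Int.mod (w.2.2 + p) (if w.1 ≤ pivot then c else 2))) M

def fusedW (p c pivot : Int) (M : List (List Int)) (ws : List (Int × Int × Int)) : List (List Int) :=
  ws.foldl (fun M w =>
    pySet2 (pySet2 M w.1 w.2.1 w.2.2) w.2.1 w.1
      (PySem.Int.mod (w.2.2 + p) (if w.1 ≤ pivot then c else 2))) M

def readStep (p c pivot : Int) (M : List (List Int)) (ji : Int × Int) : List (List Int) :=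
  pySet2 M ji.2 ji.1 (PySem.Int.mod (pyGet2 M ji.1 ji.2 + p) (if ji.1 ≤ pivot then c else 2))

def valStep (p c pivot : Int) (F : List (List Int)) (M : List (List Int)) (ji : Int × Int) : List (List Int) :=
  pySet2 M ji.2 ji.1 (PySem.Int.mod (pyGet2 F ji.1 ji.2 + p) (if ji.1 ≤ pivot then c else 2))

def Shape (N : Nat) (M : List (List Int)) : Prop :=
  M.length = N ∧ ∀ r ∈ M, r.length = N

lemma fillW_cons (M : List (List Int)) (w : Int × Int × Int) (ws : List (Int × Int × Int)) :
    fillW M (w :: ws) = fillW (pySet2 M w.1 w.2.1 w.2.2) ws := rfl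

lemma mirW_cons (p c pivot : Int) (M : List (List Int)) (w : Int × Int × Int) (ws : List (Int × Int × Int)) :
    mirW p c pivot M (w :: ws)
      = mirW p c pivot (pySet2 M w.2.1 w.1 (PySem.Int.mod (w.2.2 + p) (if w.1 ≤ pivot then c else 2))) ws := rfl

lemma fusedW_cons (p c pivot : Int) (M : List (List Int)) (w : Int × Int × Int) (ws : List (Int × Int × Int)) :
    fusedW p c pivot M (w :: ws)
      = fusedW p c pivot
          (pySet2 (pySet2 M w.1 w.2.1 w.2.2) w.2.1 w.1
            (PySem.Int.mod (w.2.2 + p) (if w.1 ≤ pivot then c else 2))) ws := rfl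

lemma donu_id (n : Int) : (PySem.List.pyGet? donuL (PySem.Int.mod n 6)).getD 0 = PySem.Int.mod n 6 := by
  have h1 := PySem.Int.mod_nonneg n (by norm_num : (0:Int) < 6)
  have h2 := PySem.Int.mod_lt n (by norm_num : (0:Int) < 6)
  obtain ⟨b, hb⟩ : ∃ b, PySem.Int.mod n 6 = b := ⟨_, rfl⟩
  rw [hb] at h1 h2 ⊢
  have : b = 0 ∨ b = 1 ∨ b = 2 ∨ b = 3 ∨ b = 4 ∨ b = 5 := by omega
  rcases this with rfl | rfl | rfl | rfl | rfl | rfl <;> decide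

lemma pyGet2_pySet2_ne (M : List (List Int)) (a b x y v : Int)
    (h : (a.toNat, b.toNat) ≠ (x.toNat, y.toNat)) :
    pyGet2 (pySet2 M a b v) x y = pyGet2 M x y := by
  unfold pyGet2 pySet2
  simp only [List.getD_eq_getElem?_getD]
  by_cases hr : a.toNat = x.toNat
  · have hcol : b.toNat ≠ y.toNat := by simpa [Prod.ext_iff, hr] using h
    rw [hr]
    by_cases hl : x.toNat < M.length
    · rw [List.getElem?_set_self hl]
      simp only [Option.getD_some]
      rw [List.getElem?_set_ne hcol]
    · have h1 : (M.set x.toNat ((M[x.toNat]?.getD []).set b.toNat v))[x.toNat]? = none := by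
        rw [List.getElem?_eq_none_iff, List.length_set]; omega
      have h2 : M[x.toNat]? = none := by rw [List.getElem?_eq_none_iff]; omega
      rw [h1, h2]
  · rw [List.getElem?_set_ne hr]

lemma pyGet2_pySet2_self (M : List (List Int)) (x y v : Int)
    (h1 : x.toNat < M.length) (h2 : y.toNat < (M.getD x.toNat []).length) :
    pyGet2 (pySet2 M x y v) x y = v := by
  unfold pyGet2 pySet2
  simp only [List.getD_eq_getElem?_getD]
  rw [List.getElem?_set_self h1]
  simp only [Option.getD_some]
  rw [List.getElem?_set_self (by simpa [List.getD_eq_getElem?_getD] using h2)]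
  simp

lemma pySet2_comm (M : List (List Int)) (a b x y v w : Int)
    (h : (a.toNat, b.toNat) ≠ (x.toNat, y.toNat)) :
    pySet2 (pySet2 M a b v) x y w = pySet2 (pySet2 M x y w) a b v := by
  unfold pySet2
  by_cases hr : a.toNat = x.toNat
  · have hcol : b.toNat ≠ y.toNat := by simpa [Prod.ext_iff, hr] using h
    rw [hr]
    by_cases hl : x.toNat < M.length
    · have e1 : (M.set x.toNat ((M.getD x.toNat []).set b.toNat v)).getD x.toNat []
          = (M.getD x.toNat []).set b.toNat v := by
        simp [List.getD_eq_getElem?_getD, List.getElem?_set_self hl]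
      have e2 : (M.set x.toNat ((M.getD x.toNat []).set y.toNat w)).getD x.toNat []
          = (M.getD x.toNat []).set y.toNat w := by
        simp [List.getD_eq_getElem?_getD, List.getElem?_set_self hl]
      rw [e1, e2, List.set_set, List.set_set, List.set_comm _ _ hcol]
    · have e0 : ∀ r : List Int, M.set x.toNat r = M :=
        fun r => List.set_eq_of_length_le (by omega)
      simp [e0]
  · have gA : ∀ r : List Int, (M.set a.toNat r).getD x.toNat [] = M.getD x.toNat [] := by
      intro r; simp [List.getD_eq_getElem?_getD, List.getElem?_set_ne hr]
    have gX : ∀ r : List Int, (M.set x.toNat r).getD a.toNat [] = M.getD a.toNat [] := by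
      intro r; simp [List.getD_eq_getElem?_getD, List.getElem?_set_ne (Ne.symm hr)]
    rw [gA, gX, List.set_comm _ _ hr]

lemma shape_pySet2 {N : Nat} {M : List (List Int)} (a b v : Int) (h : Shape N M) :
    Shape N (pySet2 M a b v) := by
  obtain ⟨h1, h2⟩ := h
  by_cases ha : a.toNat < M.length
  · refine ⟨by simp [pySet2, h1], ?_⟩
    intro r hr
    unfold pySet2 at hr
    rcases List.mem_or_eq_of_mem_set hr with hr' | rfl
    · exact h2 r hr'
    · rw [List.length_set]
      have hmem : M.getD a.toNat [] ∈ M := by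
        rw [List.getD_eq_getElem?_getD, List.getElem?_eq_getElem ha]
        exact List.getElem_mem ha
      exact h2 _ hmem
  · unfold pySet2
    rw [List.set_eq_of_length_le (by omega)]
    exact ⟨h1, h2⟩

lemma shape_row_len {N : Nat} {M : List (List Int)} (h : Shape N M) {i : Nat} (hi : i < M.length) :
    (M.getD i []).length = N := by
  have hmem : M.getD i [] ∈ M := by
    rw [List.getD_eq_getElem?_getD, List.getElem?_eq_getElem hi]
    exact List.getElem_mem hi
  exact h.2 _ hmem

lemma fillW_untouched (ws : List (Int × Int × Int)) (x y : Int) :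
    ∀ M : List (List Int), (∀ w ∈ ws, (w.1.toNat, w.2.1.toNat) ≠ (x.toNat, y.toNat)) →
      pyGet2 (fillW M ws) x y = pyGet2 M x y := by
  induction ws with
  | nil => intro M _; rfl
  | cons w ws ih =>
    intro M h
    rw [fillW_cons, ih _ (fun w' hw' => h w' (List.mem_cons_of_mem _ hw'))]
    exact pyGet2_pySet2_ne M _ _ _ _ _ (h w (List.mem_cons_self ..))

lemma fillW_pySet2_comm (ws : List (Int × Int × Int)) (a b v : Int) :
    ∀ M : List (List Int), (∀ w ∈ ws, (w.1.toNat, w.2.1.toNat) ≠ (a.toNat, b.toNat)) →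
      fillW (pySet2 M a b v) ws = pySet2 (fillW M ws) a b v := by
  induction ws with
  | nil => intro M _; rfl
  | cons w ws ih =>
    intro M h
    rw [fillW_cons, fillW_cons,
        pySet2_comm M a b w.1 w.2.1 v w.2.2 (Ne.symm (h w (List.mem_cons_self ..)))]
    exact ih _ (fun w' hw' => h w' (List.mem_cons_of_mem _ hw'))

lemma get_fillW {N : Nat} (ws : List (Int × Int × Int)) :
    ∀ M : List (List Int), Shape N M →
      ((ws.map (fun w => (w.1.toNat, w.2.1.toNat))).Nodup) →
      (∀ w ∈ ws, w.1.toNat < N ∧ w.2.1.toNat < N) →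
      ∀ w ∈ ws, pyGet2 (fillW M ws) w.1 w.2.1 = w.2.2 := by
  induction ws with
  | nil => intro M _ _ _ w hw; simp at hw
  | cons w0 ws ih =>
    intro M hsh hnd hb w hw
    simp only [List.map_cons, List.nodup_cons] at hnd
    obtain ⟨hnotin, hnd'⟩ := hnd
    rcases List.mem_cons.mp hw with rfl | hw'
    · rw [fillW_cons, fillW_untouched ws w.1 w.2.1 _ ?hcells]
      case hcells =>
        intro w' hw' he
        exact hnotin (List.mem_map.mpr ⟨w', hw', he⟩)
      have hbw := hb w (List.mem_cons_self ..)
      apply pyGet2_pySet2_self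
      · rw [hsh.1]; omega
      · rw [shape_row_len hsh (by rw [hsh.1]; omega)]; omega
    · rw [fillW_cons]
      exact ih _ (shape_pySet2 _ _ _ hsh) hnd'
        (fun w'' h'' => hb w'' (List.mem_cons_of_mem _ h'')) w hw'

lemma interleave (p c pivot : Int) (ws : List (Int × Int × Int)) :
    ∀ M : List (List Int), (∀ w ∈ ws, 1 ≤ w.1 ∧ w.1 < w.2.1) →
      mirW p c pivot (fillW M ws) ws = fusedW p c pivot M ws := by
  induction ws with
  | nil => intro M _; rfl
  | cons w ws ih =>
    intro M h
    have hw := h w (List.mem_cons_self ..)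
    have hcells : ∀ w' ∈ ws, (w'.1.toNat, w'.2.1.toNat) ≠ (w.2.1.toNat, w.1.toNat) := by
      intro w' hw' he
      have h' := h w' (List.mem_cons_of_mem _ hw')
      rw [Prod.ext_iff] at he
      simp only at he
      omega
    rw [fillW_cons, mirW_cons, fusedW_cons,
        ← fillW_pySet2_comm ws w.2.1 w.1 _ _ hcells]
    exact ih _ (fun w' hw' => h w' (List.mem_cons_of_mem _ hw'))

lemma read_to_val (p c pivot : Int) (F : List (List Int)) (P : List (Int × Int)) :
    ∀ M : List (List Int),
      (∀ j i : Int, 1 ≤ j → j < i → pyGet2 M j i = pyGet2 F j i) →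
      (∀ ji ∈ P, 1 ≤ ji.1 ∧ ji.1 < ji.2) →
      P.foldl (readStep p c pivot) M = P.foldl (valStep p c pivot F) M := by
  induction P with
  | nil => intro M _ _; rfl
  | cons ji P ih =>
    intro M hag hP
    have h1 := hP ji (List.mem_cons_self ..)
    simp only [List.foldl_cons]
    have hread : readStep p c pivot M ji = valStep p c pivot F M ji := by
      unfold readStep valStep
      rw [hag ji.1 ji.2 h1.1 h1.2]
    rw [hread]
    refine ih _ ?_ (fun x hx => hP x (List.mem_cons_of_mem _ hx))
    intro j i hj hji
    unfold valStep
    rw [pyGet2_pySet2_ne]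
    · exact hag j i hj hji
    · intro he
      rw [Prod.ext_iff] at he
      simp only at he
      omega

lemma mem_aPairs (c k d_row : Int) :
    ∀ ji ∈ aPairs c k d_row, 1 ≤ ji.1 ∧ ji.1 < ji.2 ∧ ji.2 < c * k + 2 := by
  intro ji hji
  unfold aPairs ascBlock at hji
  simp only [List.mem_flatMap, List.mem_map, List.mem_filter,
    PySem.List.mem_pyRange_one, decide_eq_true_eq] at hji
  obtain ⟨j, ⟨hj1, hj2⟩, i, ⟨⟨hi1, hi2⟩, hlt⟩, rfl⟩ := hji
  refine ⟨hj1, hlt, hi2⟩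

lemma cols_eq (c k j : Int) (hj : 1 ≤ j) :
    (PySem.List.pyRange 0 (c * k + 2) 1).filter (fun i => decide (j < i))
      = (PySem.List.pyRange 2 (c * k + 2) 1).filter (fun i => decide (j < i)) := by
  by_cases h2 : (2 : Int) ≤ c * k + 2
  · rw [PySem.List.pyRange_one_append 0 2 (c * k + 2) (by norm_num) h2, List.filter_append]
    have hnil : (PySem.List.pyRange 0 2 1).filter (fun i => decide (j < i)) = [] := by
      apply List.filter_eq_nil_iff.mpr
      intro a ha
      rw [PySem.List.mem_pyRange_one] at ha
      simp only [decide_eq_true_eq]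
      omega
    rw [hnil, List.nil_append]
  · have e1 : PySem.List.pyRange 2 (c * k + 2) 1 = [] := PySem.List.pyRange_one_eq_nil (by omega)
    rw [e1, List.filter_nil]
    apply List.filter_eq_nil_iff.mpr
    intro a ha
    rw [PySem.List.mem_pyRange_one] at ha
    simp only [decide_eq_true_eq]
    omega

lemma dPairs_eq_reverse (c k d_row : Int) :
    dPairs c k d_row = (aPairs c k d_row).reverse := by
  unfold dPairs aPairs
  have h01 : (0 : Int) + 1 = 1 := by norm_num
  have h11 : (1 : Int) + 1 = 2 := by norm_num
  have hck : c * k + 1 + 1 = c * k + 2 := by ring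
  rw [PySem.List.pyRange_neg_one_eq_reverse d_row 0,
      PySem.List.pyRange_neg_one_eq_reverse (c * k + 1) 1, h01, h11, hck,
      List.reverse_flatMap]
  apply List.flatMap_congr
  intro j hj
  rw [List.mem_reverse, PySem.List.mem_pyRange_one] at hj
  simp only [Function.comp_apply]
  unfold ascBlock
  rw [List.filter_reverse, List.map_reverse, cols_eq c k j hj.1]

lemma mem_dPairs (c k d_row : Int) :
    ∀ ji ∈ dPairs c k d_row, 1 ≤ ji.1 ∧ ji.1 < ji.2 ∧ ji.2 < c * k + 2 := by
  intro ji hji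
  rw [dPairs_eq_reverse, List.mem_reverse] at hji
  exact mem_aPairs c k d_row ji hji

lemma nodup_aPairs (c k d_row : Int) : (aPairs c k d_row).Nodup := by
  unfold aPairs
  rw [List.nodup_flatMap]
  constructor
  · intro j hj
    unfold ascBlock
    refine List.Nodup.map ?_ (List.Nodup.filter _ (PySem.List.nodup_pyRange_one 0 (c * k + 2)))
    intro a b hab
    simpa using hab
  · refine List.Pairwise.imp ?_ (PySem.List.pairwise_lt_pyRange_one 1 (d_row + 1))
    intro j j' hlt
    intro x hx hx'
    unfold ascBlock at hx hx'
    simp only [List.mem_map] at hx hx'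
    obtain ⟨i, _, rfl⟩ := hx
    obtain ⟨i', _, he⟩ := hx'
    rw [Prod.ext_iff] at he
    simp only at he
    omega

lemma nodup_aPairs_cells (c k d_row : Int) :
    ((aPairs c k d_row).map (fun ji : Int × Int => (ji.1.toNat, ji.2.toNat))).Nodup := by
  refine List.Nodup.map_on ?_ (nodup_aPairs c k d_row)
  intro x hx y hy he
  have hbx := mem_aPairs c k d_row x hx
  have hby := mem_aPairs c k d_row y hy
  rw [Prod.ext_iff] at he
  simp only at he
  rw [Prod.ext_iff]
  omega

lemma nodup_dPairs_cells (c k d_row : Int) :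
    ((dPairs c k d_row).map (fun ji : Int × Int => (ji.1.toNat, ji.2.toNat))).Nodup := by
  rw [dPairs_eq_reverse, List.map_reverse, List.nodup_reverse]
  exact nodup_aPairs_cells c k d_row

lemma thread_proj (c : Int) :
    ∀ (P : List (Int × Int)) (n : Int), (thread c n P).map (fun w => (w.1, w.2.1)) = P := by
  intro P
  induction P with
  | nil => intro n; rfl
  | cons ji P ih => intro n; simp [thread, ih]

lemma thread_mem (c : Int) (P : List (Int × Int)) (n : Int) :
    ∀ w ∈ thread c n P, (w.1, w.2.1) ∈ P := by
  intro w hw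
  have h := thread_proj c P n
  rw [← h]
  exact List.mem_map_of_mem hw

lemma fill_loop_eq (c : Int) (P : List (Int × Int)) :
    ∀ (n : Int) (M : List (List Int)),
      (P.foldl (fun (st : Int × List (List Int)) ji =>
          (PySem.Int.floordiv st.1 c, pySet2 st.2 ji.1 ji.2 (PySem.Int.mod st.1 c))) (n, M)).2
        = fillW M (thread c n P) := by
  induction P with
  | nil => intro n M; rfl
  | cons ji P ih =>
    intro n M
    simp only [List.foldl_cons]
    rw [ih (PySem.Int.floordiv n c) (pySet2 M ji.1 ji.2 (PySem.Int.mod n c))]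
    rfl

lemma fused_loop_eq (c p pivot : Int) (P : List (Int × Int)) :
    ∀ (n : Int) (M : List (List Int)),
      (P.foldl (fun (st : Int × List (List Int)) ji =>
          (PySem.Int.floordiv st.1 c,
            pySet2 (pySet2 st.2 ji.1 ji.2 (PySem.Int.mod st.1 c)) ji.2 ji.1
              (PySem.Int.mod (PySem.Int.mod st.1 c + p) (if ji.1 ≤ pivot then c else 2)))) (n, M)).2
        = fusedW p c pivot M (thread c n P) := by
  induction P with
  | nil => intro n M; rfl
  | cons ji P ih =>
    intro n M
    simp only [List.foldl_cons]
    rw [ih]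
    rfl

lemma nested_to_pairs {σ : Type} (c k d_row : Int) (g : σ → (Int × Int) → σ) (init : σ) :
    (PySem.List.pyRange d_row 0 (-1)).foldl
      (fun st j => (PySem.List.pyRange (c * k + 1) 1 (-1)).foldl
        (fun st i => if j < i then g st (j, i) else st) st) init
      = (dPairs c k d_row).foldl g init := by
  unfold dPairs
  rw [List.foldl_flatMap]
  refine PySem.List.foldl_congr_mem _ _ _ _ ?_
  intro st j _
  rw [List.foldl_map]
  exact PySem.List.foldl_ite_eq_foldl_filter (fun i => j < i) (fun st i => g st (j, i)) _ _

lemma row_to_block (c k p pivot j : Int) (M : List (List Int)) :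
    (PySem.List.pyRange 0 (c * k + 2) 1).foldl
      (fun Mc i =>
        if j < i then pySet2 Mc i j (PySem.Int.mod (pyGet2 Mc j i + p) (if j ≤ pivot then c else 2)) else Mc) M
      = (ascBlock c k j).foldl (readStep p c pivot) M := by
  unfold ascBlock
  rw [List.foldl_map]
  exact PySem.List.foldl_ite_eq_foldl_filter (fun i => j < i)
    (fun Mc i => pySet2 Mc i j (PySem.Int.mod (pyGet2 Mc j i + p) (if j ≤ pivot then c else 2))) _ _

lemma symet_aux (c k p pivot : Int) (m : Nat) :
    ∀ M : List (List Int),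
      (PySem.List.pyRange 1 ((m : Int) + 1) 1).foldl
        (fun (st : Int × List (List Int)) j =>
          ((if pivot < j then 2 else st.1),
            (PySem.List.pyRange 0 (c * k + 2) 1).foldl
              (fun Mc i =>
                if j < i then pySet2 Mc i j (PySem.Int.mod (pyGet2 Mc j i + p) (if pivot < j then 2 else st.1)) else Mc)
              st.2))
        (c, M)
      = ((if 1 ≤ (m : Int) ∧ pivot < (m : Int) then 2 else c),
         ((PySem.List.pyRange 1 ((m : Int) + 1) 1).flatMap (ascBlock c k)).foldl (readStep p c pivot) M) := by
  induction m with
  | zero =>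
    intro M
    have h0 : PySem.List.pyRange 1 ((0 : Nat) + 1 : Int) 1 = [] :=
      PySem.List.pyRange_one_eq_nil (by norm_num)
    rw [h0]
    simp
  | succ m ih =>
    intro M
    have hcast : (((m + 1 : Nat) : Int) + 1) = ((m : Int) + 1) + 1 := by push_cast; ring
    rw [hcast, PySem.List.pyRange_one_succ_right (by omega : (1 : Int) ≤ (m : Int) + 1),
        List.foldl_append, List.foldl_cons, List.foldl_nil, ih M,
        List.flatMap_append, List.foldl_append]
    have hd : (if pivot < (m : Int) + 1 then 2 else (if 1 ≤ (m : Int) ∧ pivot < (m : Int) then 2 else c))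
        = (if ((m : Int) + 1) ≤ pivot then c else 2) := by
      split_ifs <;> first | rfl | omega
    rw [Prod.ext_iff]
    constructor
    · simp only
      rw [hd]
      push_cast
      split_ifs <;> first | rfl | omega
    · simp only
      rw [hd, row_to_block c k p pivot ((m : Int) + 1)]
      simp only [List.flatMap_cons, List.flatMap_nil, List.append_nil]

lemma symet_eq (M : List (List Int)) (c k p d_row pivot : Int) :
    symetrizujL M c k p d_row pivot = (aPairs c k d_row).foldl (readStep p c pivot) M := by
  by_cases hd : d_row < 1
  · have h0 : PySem.List.pyRange 1 (d_row + 1) 1 = [] :=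
      PySem.List.pyRange_one_eq_nil (by omega)
    unfold symetrizujL aPairs
    rw [h0]
    rfl
  · have hm : ((d_row.toNat : Int)) = d_row := Int.toNat_of_nonneg (by omega)
    have h := symet_aux c k p pivot d_row.toNat M
    rw [hm] at h
    exact congrArg Prod.snd h

lemma shape_replicate (N : Nat) :
    Shape N (List.replicate N (List.replicate N (0 : Int))) := by
  refine ⟨List.length_replicate, ?_⟩
  intro r hr
  rw [List.eq_of_mem_replicate hr]
  exact List.length_replicate

lemma val_to_mir (p c pivot : Int) (F X : List (List Int)) (ws : List (Int × Int × Int))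
    (hF : ∀ w ∈ ws, pyGet2 F w.1 w.2.1 = w.2.2) :
    (ws.map (fun w => (w.1, w.2.1))).foldl (valStep p c pivot F) X = mirW p c pivot X ws := by
  rw [List.foldl_map]
  refine PySem.List.foldl_congr_mem _ _ _ _ ?_
  intro acc w hw
  unfold valStep
  simp only
  rw [hF w hw]

lemma main_eq (c k p num d_row pivot : Int) (M0 : List (List Int))
    (hsh : Shape (c * k + 2).toNat M0) :
    symetrizujL (fillW M0 (thread c num (dPairs c k d_row))) c k p d_row pivot
      = fusedW p c pivot M0 (thread c num (dPairs c k d_row)) := by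
  have hwb : ∀ w ∈ thread c num (dPairs c k d_row), 1 ≤ w.1 ∧ w.1 < w.2.1 ∧ w.2.1 < c * k + 2 := by
    intro w hw
    exact mem_dPairs c k d_row _ (thread_mem c (dPairs c k d_row) num w hw)
  have hcells : ((thread c num (dPairs c k d_row)).map (fun w => (w.1.toNat, w.2.1.toNat))).Nodup := by
    have he : ((thread c num (dPairs c k d_row)).map (fun w => (w.1, w.2.1))).map
          (fun ji : Int × Int => (ji.1.toNat, ji.2.toNat))
        = (thread c num (dPairs c k d_row)).map (fun w => (w.1.toNat, w.2.1.toNat)) := by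
      rw [List.map_map]
      rfl
    rw [← he, thread_proj]
    exact nodup_dPairs_cells c k d_row
  have hF : ∀ w ∈ thread c num (dPairs c k d_row),
      pyGet2 (fillW M0 (thread c num (dPairs c k d_row))) w.1 w.2.1 = w.2.2 := by
    refine get_fillW _ _ hsh hcells ?_
    intro w hw
    have := hwb w hw
    omega
  have hcomm : ∀ x ∈ aPairs c k d_row, ∀ y ∈ aPairs c k d_row,
      ∀ z : List (List Int),
        valStep p c pivot (fillW M0 (thread c num (dPairs c k d_row)))
          (valStep p c pivot (fillW M0 (thread c num (dPairs c k d_row))) z x) y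
        = valStep p c pivot (fillW M0 (thread c num (dPairs c k d_row)))
            (valStep p c pivot (fillW M0 (thread c num (dPairs c k d_row))) z y) x := by
    intro x hx y hy z
    by_cases hxy : x = y
    · rw [hxy]
    · apply pySet2_comm
      intro he
      have hbx := mem_aPairs c k d_row x hx
      have hby := mem_aPairs c k d_row y hy
      rw [Prod.ext_iff] at he
      simp only at he
      apply hxy
      rw [Prod.ext_iff]
      omega
  have hperm : List.Perm (aPairs c k d_row) (dPairs c k d_row) := by
    rw [dPairs_eq_reverse]
    exact (List.reverse_perm _).symm
  have hmir := val_to_mir p c pivot (fillW M0 (thread c num (dPairs c k d_row)))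
      (fillW M0 (thread c num (dPairs c k d_row))) (thread c num (dPairs c k d_row)) hF
  rw [thread_proj] at hmir
  rw [symet_eq,
      read_to_val p c pivot (fillW M0 (thread c num (dPairs c k d_row))) (aPairs c k d_row) _
        (fun _ _ _ _ => rfl)
        (fun ji hji => ⟨(mem_aPairs c k d_row ji hji).1, (mem_aPairs c k d_row ji hji).2.1⟩),
      hperm.foldl_eq' hcomm, hmir]
  exact interleave p c pivot _ _ (fun w hw => ⟨(hwb w hw).1, (hwb w hw).2.1⟩)

lemma M0A_eq (n : Int) :
    (PySem.List.pyRange 0 n 1).map (fun _ => (PySem.List.pyRange 0 n 1).map (fun _ => (0 : Int)))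
      = List.replicate n.toNat (List.replicate n.toNat (0 : Int)) := by
  rw [List.map_const', List.map_const', PySem.List.length_pyRange_one]
  norm_num

lemma M0B_eq (n : Int) :
    (List.range n.toNat).map (fun _ => List.replicate n.toNat (0 : Int))
      = List.replicate n.toNat (List.replicate n.toNat (0 : Int)) := by
  rw [List.map_const', List.length_range]

-- ===== VERDICT (by name: the statement is the Claim_ definition above) =====
theorem denum_matrix_spec : Claim_equal_denum_matrix := by
  intro c k p num d_row pivot _
  show denum_matrix c k p num d_row pivot = denum_matrix_alt c k p num d_row pivot
  simp only [denum_matrix, denum_matrix_alt]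
  by_cases hc : c = 6
  · subst hc
    rw [if_pos rfl]
    have hstep :
        (fun (st : Int × List (List Int)) j =>
          (PySem.List.pyRange (6 * k + 1) 1 (-1)).foldl
            (fun st i =>
              if j < i then
                (PySem.Int.floordiv st.1 6,
                 pySet2 st.2 j i ((PySem.List.pyGet? donuL (PySem.Int.mod st.1 6)).getD 0))
              else st) st)
        = (fun (st : Int × List (List Int)) j =>
          (PySem.List.pyRange (6 * k + 1) 1 (-1)).foldl
            (fun st i =>
              if j < i then
                (PySem.Int.floordiv st.1 6, pySet2 st.2 j i (PySem.Int.mod st.1 6))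
              else st) st) := by
      funext st j
      refine PySem.List.foldl_congr_mem _ _ _ _ ?_
      intro acc i _
      by_cases h : j < i
      · rw [if_pos h, if_pos h, donu_id]
      · rw [if_neg h, if_neg h]
    rw [hstep]
    rw [show ((PySem.List.pyRange d_row 0 (-1)).foldl
          (fun (st : Int × List (List Int)) j =>
            (PySem.List.pyRange (6 * k + 1) 1 (-1)).foldl
              (fun st i =>
                if j < i then
                  (PySem.Int.floordiv st.1 6, pySet2 st.2 j i (PySem.Int.mod st.1 6))
                else st) st)
          (num, (PySem.List.pyRange 0 (6 * k + 2) 1).map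
            (fun _ => (PySem.List.pyRange 0 (6 * k + 2) 1).map (fun _ => (0 : Int))))).2
        = fillW ((PySem.List.pyRange 0 (6 * k + 2) 1).map
            (fun _ => (PySem.List.pyRange 0 (6 * k + 2) 1).map (fun _ => (0 : Int))))
            (thread 6 num (dPairs 6 k d_row)) from
      (congrArg Prod.snd (nested_to_pairs 6 k d_row _ _)).trans (fill_loop_eq 6 _ num _)]
    rw [show ((PySem.List.pyRange d_row 0 (-1)).foldl
          (fun (st : Int × List (List Int)) j =>
            (PySem.List.pyRange (6 * k + 1) 1 (-1)).foldl
              (fun st i =>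
                if j < i then
                  (PySem.Int.floordiv st.1 6,
                   pySet2 (pySet2 st.2 j i (PySem.Int.mod st.1 6)) i j
                     (PySem.Int.mod (PySem.Int.mod st.1 6 + p) (if j ≤ pivot then 6 else 2)))
                else st) st)
          (num, (List.range (6 * k + 2).toNat).map
            (fun _ => List.replicate (6 * k + 2).toNat (0 : Int)))).2
        = fusedW p 6 pivot ((List.range (6 * k + 2).toNat).map
            (fun _ => List.replicate (6 * k + 2).toNat (0 : Int)))
            (thread 6 num (dPairs 6 k d_row)) from
      (congrArg Prod.snd (nested_to_pairs 6 k d_row _ _)).trans (fused_loop_eq 6 p pivot _ num _)]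
    rw [M0A_eq, M0B_eq]
    exact main_eq 6 k p num d_row pivot _ (shape_replicate _)
  · rw [if_neg hc]
    rw [show ((PySem.List.pyRange d_row 0 (-1)).foldl
          (fun (st : Int × List (List Int)) j =>
            (PySem.List.pyRange (c * k + 1) 1 (-1)).foldl
              (fun st i =>
                if j < i then
                  (PySem.Int.floordiv st.1 c, pySet2 st.2 j i (PySem.Int.mod st.1 c))
                else st) st)
          (num, (PySem.List.pyRange 0 (c * k + 2) 1).map
            (fun _ => (PySem.List.pyRange 0 (c * k + 2) 1).map (fun _ => (0 : Int))))).2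
        = fillW ((PySem.List.pyRange 0 (c * k + 2) 1).map
            (fun _ => (PySem.List.pyRange 0 (c * k + 2) 1).map (fun _ => (0 : Int))))
            (thread c num (dPairs c k d_row)) from
      (congrArg Prod.snd (nested_to_pairs c k d_row _ _)).trans (fill_loop_eq c _ num _)]
    rw [show ((PySem.List.pyRange d_row 0 (-1)).foldl
          (fun (st : Int × List (List Int)) j =>
            (PySem.List.pyRange (c * k + 1) 1 (-1)).foldl
              (fun st i =>
                if j < i then
                  (PySem.Int.floordiv st.1 c,
                   pySet2 (pySet2 st.2 j i (PySem.Int.mod st.1 c)) i j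
                     (PySem.Int.mod (PySem.Int.mod st.1 c + p) (if j ≤ pivot then c else 2)))
                else st) st)
          (num, (List.range (c * k + 2).toNat).map
            (fun _ => List.replicate (c * k + 2).toNat (0 : Int)))).2
        = fusedW p c pivot ((List.range (c * k + 2).toNat).map
            (fun _ => List.replicate (c * k + 2).toNat (0 : Int)))
            (thread c num (dPairs c k d_row)) from
      (congrArg Prod.snd (nested_to_pairs c k d_row _ _)).trans (fused_loop_eq c p pivot _ num _)]
    rw [M0A_eq, M0B_eq]
    exact main_eq c k p num d_row pivot _ (shape_replicate _)
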